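-- pv_equiv track=rewrite | github.com/Greenun/algorithmPractice | coalgo/liar.py | solution
-- ===== SOURCE A (Python) =====
-- from collections import defaultdict
--
-- def solution(n, m, oracles, parties):
-- 	party_groups = defaultdict(set)
-- 	idx = 0
-- 	for i, party in enumerate(parties):
-- 		party_groups[i] = party
--
-- 	for _ in range(m):
-- 		for party in parties:
-- 			keys = party_groups.keys()
-- 			for k in keys:
-- 				if party_groups[k].intersection(party):
-- 					party_groups[k] = party_groups[k].union(party)
-- 	count = 0
-- 	for k in party_groups:
-- 		if not oracles.intersection(party_groups[k]):
-- 			count += 1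
-- 	return count
-- ===== SOURCE B (Python) =====
-- def solution(n, m, oracles, parties):
--     count = 0
--     for p0 in parties:
--         g = p0.copy()
--         for _ in range(m):
--             before = len(g)
--             for p in parties:
--                 if g & p:
--                     g |= p
--             if len(g) == before:
--                 break
--         if not (oracles & g):
--             count += 1
--     return count
-- ===== Notes on version B (the rewrite author's own statement) =====
-- stated objective: faster
-- what changed: B drops the dict of all groups and the fixed m global merge rounds: it closes each party's group independently with repeated sweeps over the parties, stopping as soon as a sweep adds no element (a sweep that changes nothing is a fixpoint), so the m factor disappears once groups converge.
import Mathlib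
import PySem

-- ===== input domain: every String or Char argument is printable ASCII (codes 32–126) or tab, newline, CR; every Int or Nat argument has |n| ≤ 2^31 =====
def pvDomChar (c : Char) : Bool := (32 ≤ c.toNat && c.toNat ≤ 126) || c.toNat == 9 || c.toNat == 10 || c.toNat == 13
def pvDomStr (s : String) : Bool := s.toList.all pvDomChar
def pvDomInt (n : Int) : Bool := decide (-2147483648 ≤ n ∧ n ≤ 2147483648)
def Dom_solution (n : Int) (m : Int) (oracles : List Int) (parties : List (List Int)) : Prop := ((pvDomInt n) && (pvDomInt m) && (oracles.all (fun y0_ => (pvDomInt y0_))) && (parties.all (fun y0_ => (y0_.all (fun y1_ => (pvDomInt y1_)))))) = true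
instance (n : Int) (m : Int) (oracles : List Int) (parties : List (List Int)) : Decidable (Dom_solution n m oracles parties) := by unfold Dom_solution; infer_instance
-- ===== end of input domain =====

-- B replaces A's m global merge rounds over a dict of all groups by closing each group
-- independently, stopping as soon as one sweep over the parties adds nothing to the group.

-- ===== PORT A =====
-- party_groups = defaultdict(set); for i, party in enumerate(parties): party_groups[i] = party
-- for _ in range(m): for party in parties: for k in keys: if group ∩ party ≠ ∅: group ∪= party
-- finally count the keys whose group misses the oracles
def solution (n : Int) (m : Int) (oracles : List Int) (parties : List (List Int)) : Int :=
  let d0 : PySem.Dict Int (PySem.Set Int) :=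
    (PySem.List.enumerate parties).foldl (fun d ip => d.insert ip.1 ip.2) PySem.Dict.empty
  let d1 := (PySem.List.pyRange 0 m 1).foldl (fun d _ =>
      parties.foldl (fun d party =>
        d.keys.foldl (fun d' k =>
          if PySem.Set.inter (d'.getD k []) party ≠ [] then
            d'.insert k (PySem.Set.union (d'.getD k []) party)
          else d') d) d) d0
  d1.keys.foldl (fun c k =>
    if PySem.Set.inter oracles (d1.getD k []) = [] then c + 1 else c) 0

-- ===== PORT B =====
-- Source B's inner 'for _ in range(m): sweep the parties into g; if len(g) unchanged: break'
def solutionAltClose (parties : List (List Int)) : Nat → PySem.Set Int → PySem.Set Int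
  | 0, g => g
  | fuel+1, g =>
    let before := g.length
    let g' := parties.foldl
      (fun g p => if PySem.Set.inter g p ≠ [] then PySem.Set.union g p else g) g
    if g'.length = before then g' else solutionAltClose parties fuel g'

def solution_alt (n : Int) (m : Int) (oracles : List Int) (parties : List (List Int)) : Int :=
  parties.foldl (fun count p0 =>
    let g := solutionAltClose parties (PySem.List.pyRange 0 m 1).length p0
    if PySem.Set.inter oracles g = [] then count + 1 else count) 0

-- ===== PRECONDITION & SPEC =====
def Spec_solution (n : Int) (m : Int) (oracles : List Int) (parties : List (List Int)) (out : Int) : Prop := out = solution_alt n m oracles parties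
instance (n : Int) (m : Int) (oracles : List Int) (parties : List (List Int)) (out : Int) : Decidable (Spec_solution n m oracles parties out) := by unfold Spec_solution; infer_instance

-- ===== CLAIM (what is proved, stated in full; the proofs are below) =====
def Claim_equal_solution : Prop := ∀ (n : Int) (m : Int) (oracles : List Int) (parties : List (List Int)), Dom_solution n m oracles parties → Spec_solution n m oracles parties (solution n m oracles parties)

-- ===== LEMMAS AND PROOFS =====

-- the value update A applies to one group for one party; a sweep applies it for all parties
def pvStepVal (p : List Int) (g : PySem.Set Int) : PySem.Set Int :=
  if PySem.Set.inter g p ≠ [] then PySem.Set.union g p else g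

def pvSweep (parties : List (List Int)) (g : PySem.Set Int) : PySem.Set Int :=
  parties.foldl
    (fun g p => if PySem.Set.inter g p ≠ [] then PySem.Set.union g p else g) g

lemma sweep_cons (p : List Int) (ps : List (List Int)) (g : PySem.Set Int) :
    pvSweep (p :: ps) g = pvSweep ps (pvStepVal p g) := rfl

-- A's inner loop over the keys, and one whole party-round of A
def pvStepDict (p : List Int) (ks : List Int) (d : PySem.Dict Int (PySem.Set Int)) :
    PySem.Dict Int (PySem.Set Int) :=
  ks.foldl (fun d' k =>
    if PySem.Set.inter (d'.getD k []) p ≠ [] then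
      d'.insert k (PySem.Set.union (d'.getD k []) p)
    else d') d

def pvRound (parties : List (List Int)) (d : PySem.Dict Int (PySem.Set Int)) :
    PySem.Dict Int (PySem.Set Int) :=
  parties.foldl (fun d party => pvStepDict party d.keys d) d

-- building the dict by inserting fresh, pairwise distinct keys appends the pairs
lemma foldl_insert_fresh {ν : Type} (pairs : List (Int × ν)) (d : PySem.Dict Int ν)
    (h : ∀ q ∈ pairs, d.contains q.1 = false) (hnd : (pairs.map Prod.fst).Nodup) :
    (pairs.foldl (fun d ip => d.insert ip.1 ip.2) d) = PySem.Dict.mk (d.items ++ pairs) := by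
  induction pairs generalizing d with
  | nil => simp
  | cons q rest ih =>
    have hq : d.contains q.1 = false := h q (by simp)
    have hins : d.insert q.1 q.2 = PySem.Dict.mk (d.items ++ [q]) := by
      simp [PySem.Dict.insert, hq]
    simp only [List.foldl_cons, hins]
    rw [ih]
    · simp
    · intro r hr
      rw [PySem.Dict.contains_mk]
      simp only [List.any_append, Bool.or_eq_false_iff]
      constructor
      · have := h r (by simp [hr])
        rwa [PySem.Dict.contains] at this
      · simp only [List.any_cons, List.any_nil, Bool.or_false]
        have : r.1 ≠ q.1 := by
          intro e
          simp only [List.map_cons, List.nodup_cons] at hnd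
          exact hnd.1 (e ▸ List.mem_map_of_mem hr)
        simp [Ne.symm this]
    · simp only [List.map_cons, List.nodup_cons] at hnd
      exact hnd.2

lemma enum_map_fst (l : List (List Int)) (s : Int) :
    (PySem.List.enumerate l s).map Prod.fst
      = (List.range l.length).map (fun (i : Nat) => s + (i : Int)) := by
  induction l generalizing s with
  | nil => simp [PySem.List.enumerate]
  | cons x t ih =>
    rw [PySem.List.enumerate_cons]
    simp only [List.map_cons, ih, List.length_cons, List.range_succ_eq_map, List.map_map]
    congr 1
    · simp
    · apply List.map_congr_left
      intro a ha
      simp only [Function.comp_apply]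
      push_cast
      ring

lemma get?_enum (l : List (List Int)) (s : Int) (i : Nat) (h : i < l.length) :
    (PySem.Dict.mk (PySem.List.enumerate l s)).get? (s + i) = some l[i] := by
  induction l generalizing s i with
  | nil => simp at h
  | cons x t ih =>
    rw [PySem.List.enumerate_cons]
    rw [PySem.Dict.get?_mk_cons]
    cases i with
    | zero => simp
    | succ j =>
      have hne : (s == s + ((j:Int)+1)) = false := by simp; omega
      simp only [Nat.cast_add, Nat.cast_one, hne]
      have := ih (s+1) j (by simpa using h)
      rw [show s + ((j:Int)+1) = (s+1) + (j:Int) by ring]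
      simpa using this

-- inserting an existing key keeps the key list
lemma keys_insert_contains {ν : Type} (d : PySem.Dict Int ν) (k : Int) (v : ν)
    (h : d.contains k = true) : (d.insert k v).keys = d.keys := by
  simp only [PySem.Dict.insert, h, if_pos, PySem.Dict.keys]
  rw [List.map_map]
  apply List.map_congr_left
  intro p hp
  by_cases e : p.1 = k <;> simp [e]

lemma stepDict_keys (p : List Int) (ks : List Int) (d : PySem.Dict Int (PySem.Set Int))
    (h : ∀ k ∈ ks, k ∈ d.keys) : (pvStepDict p ks d).keys = d.keys := by
  induction ks generalizing d with
  | nil => rfl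
  | cons k0 rest ih =>
    unfold pvStepDict
    simp only [List.foldl_cons]
    set d' := if PySem.Set.inter (d.getD k0 []) p ≠ [] then
      d.insert k0 (PySem.Set.union (d.getD k0 []) p) else d with hd'
    have hk : (d'.keys) = d.keys := by
      rw [hd']
      split_ifs with hc
      · apply keys_insert_contains
        rw [PySem.Dict.contains_eq_decide_mem_keys]
        simp [h k0 (by simp)]
      · rfl
    have := ih d' (by rw [hk]; intro k hkk; exact h k (by simp [hkk]))
    unfold pvStepDict at this
    rw [this, hk]

lemma stepDict_getD (p : List Int) (ks : List Int) (hnd : ks.Nodup)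
    (d : PySem.Dict Int (PySem.Set Int)) (k : Int) :
    (pvStepDict p ks d).getD k [] =
      if k ∈ ks then pvStepVal p (d.getD k []) else d.getD k [] := by
  induction ks generalizing d with
  | nil => simp [pvStepDict]
  | cons k0 rest ih =>
    simp only [List.nodup_cons] at hnd
    unfold pvStepDict
    simp only [List.foldl_cons]
    set d' := if PySem.Set.inter (d.getD k0 []) p ≠ [] then
      d.insert k0 (PySem.Set.union (d.getD k0 []) p) else d with hd'
    have hself : d'.getD k0 [] = pvStepVal p (d.getD k0 []) := by
      rw [hd']; unfold pvStepVal
      split_ifs with hc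
      · simp [PySem.Dict.getD, PySem.Dict.get?_insert_self]
      · rfl
    have hother : ∀ k', k' ≠ k0 → d'.getD k' [] = d.getD k' [] := by
      intro k' hne
      rw [hd']
      split_ifs with hc
      · simp [PySem.Dict.getD, PySem.Dict.get?_insert_of_ne _ _ hne]
      · rfl
    have hrec := ih hnd.2 d'
    unfold pvStepDict at hrec
    rw [hrec]
    by_cases hk0 : k = k0
    · subst hk0
      have : k ∉ rest := hnd.1
      simp [this, hself]
    · by_cases hr : k ∈ rest
      · simp [hr, hother k hk0]
      · simp [hr, hk0, hother k hk0]

lemma round_keys (parties : List (List Int)) (d : PySem.Dict Int (PySem.Set Int)) :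
    (pvRound parties d).keys = d.keys := by
  induction parties generalizing d with
  | nil => rfl
  | cons p rest ih =>
    unfold pvRound
    simp only [List.foldl_cons]
    have := ih (pvStepDict p d.keys d)
    unfold pvRound at this
    rw [this, stepDict_keys p d.keys d (fun k hk => hk)]

lemma round_getD (parties : List (List Int)) (d : PySem.Dict Int (PySem.Set Int))
    (hnd : d.keys.Nodup) (k : Int) (hk : k ∈ d.keys) :
    (pvRound parties d).getD k [] = pvSweep parties (d.getD k []) := by
  induction parties generalizing d with
  | nil => rfl
  | cons p rest ih =>
    unfold pvRound
    simp only [List.foldl_cons]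
    have hkeys : (pvStepDict p d.keys d).keys = d.keys :=
      stepDict_keys p d.keys d (fun k hk => hk)
    have := ih (pvStepDict p d.keys d) (by rw [hkeys]; exact hnd) (by rw [hkeys]; exact hk)
    unfold pvRound at this
    rw [this, stepDict_getD p d.keys hnd d k]
    simp only [hk, if_pos]
    rfl

lemma iter_round_keys (parties : List (List Int)) (r : Nat) (d : PySem.Dict Int (PySem.Set Int)) :
    ((pvRound parties)^[r] d).keys = d.keys := by
  induction r generalizing d with
  | zero => rfl
  | succ r ih => rw [Function.iterate_succ_apply, ih, round_keys]

lemma iter_round_getD (parties : List (List Int)) (r : Nat) (d : PySem.Dict Int (PySem.Set Int))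
    (hnd : d.keys.Nodup) (k : Int) (hk : k ∈ d.keys) :
    ((pvRound parties)^[r] d).getD k [] = (pvSweep parties)^[r] (d.getD k []) := by
  induction r generalizing d with
  | zero => rfl
  | succ r ih =>
    rw [Function.iterate_succ_apply, Function.iterate_succ_apply]
    rw [ih (pvRound parties d) (by rw [round_keys]; exact hnd) (by rw [round_keys]; exact hk)]
    rw [round_getD parties d hnd k hk]

lemma foldl_const_iterate {α β : Type} (l : List α) (F : β → β) (b : β) :
    l.foldl (fun b _ => F b) b = F^[l.length] b := by
  induction l generalizing b with
  | nil => rfl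
  | cons x t ih => simp [ih, Function.iterate_succ_apply]

-- a sweep only ever appends to the group
lemma prefix_update (t : List Int) (s : PySem.Set Int) : s <+: PySem.Set.update s t := by
  induction t generalizing s with
  | nil => exact List.prefix_refl s
  | cons x rest ih =>
    have h1 : s <+: PySem.Set.add s x := by
      unfold PySem.Set.add
      split_ifs
      · exact List.prefix_refl s
      · exact List.prefix_append s [x]
    exact h1.trans (ih (PySem.Set.add s x))

lemma prefix_sweep (parties : List (List Int)) (g : PySem.Set Int) :
    g <+: pvSweep parties g := by
  induction parties generalizing g with
  | nil => exact List.prefix_refl g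
  | cons p rest ih =>
    rw [sweep_cons]
    have h1 : g <+: pvStepVal p g := by
      unfold pvStepVal
      split_ifs
      · exact prefix_update p g
      · exact List.prefix_refl g
    exact h1.trans (ih (pvStepVal p g))

-- B's early-stopping loop computes the full iterate
lemma close_eq_iterate (parties : List (List Int)) (fuel : Nat) (g : PySem.Set Int) :
    solutionAltClose parties fuel g = (pvSweep parties)^[fuel] g := by
  induction fuel generalizing g with
  | zero => rfl
  | succ f ih =>
    show (if (pvSweep parties g).length = g.length then pvSweep parties g
          else solutionAltClose parties f (pvSweep parties g))
        = (pvSweep parties)^[f+1] g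
    rw [Function.iterate_succ_apply]
    split_ifs with hlen
    · have hfix : pvSweep parties g = g :=
        ((prefix_sweep parties g).eq_of_length hlen.symm).symm
      rw [hfix, Function.iterate_fixed hfix]
    · exact ih (pvSweep parties g)

lemma foldl_eq_foldl_range {α γ : Type} (l : List α) (dflt : α) (f : γ → α → γ) (c : γ) :
    l.foldl f c = (List.range l.length).foldl (fun c i => f c (l.getD i dflt)) c := by
  induction l generalizing c with
  | nil => rfl
  | cons x t ih =>
    simp only [List.foldl_cons, List.length_cons, List.range_succ_eq_map]
    rw [ih (f c x), List.foldl_map]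
    rfl

-- both sides reduced to the same fold over the party indices
lemma solution_eq_common (n : Int) (m : Int) (oracles : List Int) (parties : List (List Int)) :
    solution n m oracles parties =
      (List.range parties.length).foldl (fun c i =>
        if PySem.Set.inter oracles
            ((pvSweep parties)^[(PySem.List.pyRange 0 m 1).length] (parties.getD i [])) = []
        then c + 1 else c) 0 := by
  have hd0 : (PySem.List.enumerate parties).foldl (fun d ip => d.insert ip.1 ip.2)
      PySem.Dict.empty = PySem.Dict.mk (PySem.List.enumerate parties) := by
    rw [foldl_insert_fresh]
    · rfl
    · intro q hq; rfl
    · rw [enum_map_fst]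
      exact List.Nodup.map (fun a b h => by omega) (List.nodup_range)
  have hkeys0 : (PySem.Dict.mk (PySem.List.enumerate parties)).keys
      = (List.range parties.length).map (fun i : Nat => (i : Int)) := by
    show (PySem.List.enumerate parties).map Prod.fst = _
    rw [enum_map_fst]
    apply List.map_congr_left
    intro a _
    simp
  have hnd0 : (PySem.Dict.mk (PySem.List.enumerate parties)).keys.Nodup := by
    rw [hkeys0]
    exact List.Nodup.map (fun a b h => by omega) (List.nodup_range)
  have hget0 : ∀ i : Nat, i < parties.length →
      (PySem.Dict.mk (PySem.List.enumerate parties)).getD (i : Int) [] = parties.getD i [] := by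
    intro i h
    have := get?_enum parties 0 i h
    rw [zero_add] at this
    rw [PySem.Dict.getD, this, Option.getD_some, List.getD_eq_getElem]
  have hF : (fun (d : PySem.Dict Int (PySem.Set Int)) (_ : Int) =>
      parties.foldl (fun d party =>
        d.keys.foldl (fun d' k =>
          if PySem.Set.inter (d'.getD k []) party ≠ [] then
            d'.insert k (PySem.Set.union (d'.getD k []) party)
          else d') d) d) = (fun d _ => pvRound parties d) := rfl
  simp only [solution]
  rw [hd0, hF, foldl_const_iterate, iter_round_keys, hkeys0, List.foldl_map]
  apply PySem.List.foldl_congr_mem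
  intro acc i hi
  have hi' : i < parties.length := List.mem_range.mp hi
  have hmem : (i : Int) ∈ (PySem.Dict.mk (PySem.List.enumerate parties)).keys := by
    rw [hkeys0]
    exact List.mem_map_of_mem hi
  rw [iter_round_getD parties _ _ hnd0 (i : Int) hmem, hget0 i hi']

lemma solution_alt_eq_common (n : Int) (m : Int) (oracles : List Int) (parties : List (List Int)) :
    solution_alt n m oracles parties =
      (List.range parties.length).foldl (fun c i =>
        if PySem.Set.inter oracles
            ((pvSweep parties)^[(PySem.List.pyRange 0 m 1).length] (parties.getD i [])) = []
        then c + 1 else c) 0 := by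
  unfold solution_alt
  rw [foldl_eq_foldl_range parties [] _ 0]
  apply PySem.List.foldl_congr_mem
  intro acc p hp
  simp only [close_eq_iterate]

-- ===== VERDICT (by name: the statement is the Claim_ definition above) =====
theorem solution_spec : Claim_equal_solution := by
  intro n m oracles parties _
  unfold Spec_solution
  rw [solution_eq_common, solution_alt_eq_common]
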